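-- pv_equiv track=rewrite | github.com/Wattsy2020/cpp_learning | reformat.py | strip_parens
-- ===== SOURCE A (Python) =====
-- def strip_parens(word: str) -> str:
--     """Remove parenthesis that completely enclose a word"""
--     if word[0] != '(' or word[-1] != ')':
--         return word
--
--     open_parens = 1
--     for char in word[1:-1]:
--         if char == '(':
--             open_parens += 1
--         elif char == ')':
--             open_parens -= 1
--             if open_parens == 0: # not completely enclosing
--                 return word
--     return word[1:-1]
-- ===== SOURCE B (Python) =====
-- def _match(word: str, j: int):
--     """Recursive descent: index of the ')' closing the '(' just before position j, or None."""
--     while j < len(word):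
--         c = word[j]
--         if c == ')':
--             return j
--         if c == '(':
--             m = _match(word, j + 1)
--             if m is None:
--                 return None
--             j = m + 1
--         else:
--             j += 1
--     return None
--
--
-- def strip_parens(word: str) -> str:
--     """Remove parenthesis that completely enclose a word"""
--     if word[0] != '(' or word[-1] != ')':
--         return word
--     m = _match(word, 1)
--     if m is None or m == len(word) - 1:
--         return word[1:-1]
--     return word
-- ===== Notes on version B (the rewrite author's own statement) =====
-- stated objective: alternative
-- what changed: Replaces A's linear depth-counter scan (mutable counter, early return) with a recursive-descent parenthesis matcher that computes the index of the ')' closing word[0] by recursing into nested groups, then compares that index with the last position.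
import Mathlib
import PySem

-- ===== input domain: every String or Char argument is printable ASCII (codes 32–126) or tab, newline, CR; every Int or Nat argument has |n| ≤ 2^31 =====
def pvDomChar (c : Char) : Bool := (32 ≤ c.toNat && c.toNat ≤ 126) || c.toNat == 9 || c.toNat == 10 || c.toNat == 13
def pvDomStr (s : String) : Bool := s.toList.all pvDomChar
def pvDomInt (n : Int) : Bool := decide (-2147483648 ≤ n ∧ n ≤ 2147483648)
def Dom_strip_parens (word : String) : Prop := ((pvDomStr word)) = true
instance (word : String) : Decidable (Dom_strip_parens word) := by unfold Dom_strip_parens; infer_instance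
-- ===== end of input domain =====

-- B replaces A's depth-counter scan with a recursive-descent matcher that finds the index
-- of the ')' closing word[0] and compares it with the last position (alternative, same cost).

-- ===== PORT A =====
-- A's for-loop with early 'return word': structural recursion returning either the whole
-- word's characters (early return) or inner0 = word[1:-1] (loop completed).
def stripParensLoopA (w inner0 : List Char) : List Char → Int → List Char
  | [], _ => inner0
  | c :: rest, opens =>
    if c = '(' then stripParensLoopA w inner0 rest (opens + 1)
    else if c = ')' then
      if opens - 1 = 0 then w
      else stripParensLoopA w inner0 rest (opens - 1)
    else stripParensLoopA w inner0 rest opens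

def strip_parens (word : String) : String :=
  let cs := word.toList
  if PySem.List.pyGet? cs 0 ≠ some '(' ∨ PySem.List.pyGet? cs (-1) ≠ some ')' then word
  else
    let inner := PySem.List.slice cs (some 1) (some (-1))
    String.ofList (stripParensLoopA cs inner inner 1)

-- ===== PORT B =====
-- _match(word, j): the while loop over j becomes recursion on the suffix word[j:];
-- the returned index is the offset of the matching ')' within that suffix.
def matchAux : List Char → Option Nat
  | [] => none
  | c :: rest =>
    if c = ')' then some 0
    else if c = '(' then
      match matchAux rest with
      | none => none
      | some k =>
        match matchAux (rest.drop (k + 1)) with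
        | none => none
        | some k' => some (k + 2 + k')
    else (matchAux rest).map (· + 1)
termination_by l => l.length
decreasing_by
  all_goals simp [List.length_drop]

def strip_parens_alt (word : String) : String :=
  let cs := word.toList
  if PySem.List.pyGet? cs 0 ≠ some '(' ∨ PySem.List.pyGet? cs (-1) ≠ some ')' then word
  else
    let inner := PySem.List.slice cs (some 1) (some (-1))
    match matchAux (cs.drop 1) with
    | none => String.ofList inner
    | some m => if m + 2 = cs.length then String.ofList inner else word

-- ===== PRECONDITION & SPEC =====
-- Pre_ excludes only the empty string, on which A raises IndexError at word[0].
def Pre_strip_parens (word : String) : Prop := word ≠ ""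
instance (word : String) : Decidable (Pre_strip_parens word) := by unfold Pre_strip_parens; infer_instance
def pvWitness_strip_parens : String := "(ab)"

def Spec_strip_parens (word : String) (out : String) : Prop := out = strip_parens_alt word
instance (word : String) (out : String) : Decidable (Spec_strip_parens word out) := by unfold Spec_strip_parens; infer_instance

-- ===== CLAIM =====
def Claim_equal_strip_parens : Prop := ∀ (word : String), Dom_strip_parens word → Pre_strip_parens word → Spec_strip_parens word (strip_parens word)

-- ===== LEMMAS AND PROOFS =====

-- running-depth step: +1 for '(', -1 for ')'
def pvStep (d : Int) (c : Char) : Int :=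
  d + (if c = '(' then 1 else 0) - (if c = ')' then 1 else 0)

-- first offset at which the running depth (starting at d) reaches 0
def firstZero : Int → List Char → Option Nat
  | _, [] => none
  | d, c :: rest =>
    if pvStep d c = 0 then some 0 else (firstZero (pvStep d c) rest).map (· + 1)

lemma loopA_eq_firstZero (w inner0 : List Char) :
    ∀ (rest : List Char) (d : Int), 1 ≤ d →
      stripParensLoopA w inner0 rest d =
        (match firstZero d rest with | some _ => w | none => inner0) := by
  intro rest
  induction rest with
  | nil => intro d hd; simp [stripParensLoopA, firstZero]
  | cons c rest ih =>
    intro d hd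
    by_cases hop : c = '('
    · have hstep : pvStep d c = d + 1 := by simp [pvStep, hop]
      rw [stripParensLoopA, if_pos hop, ih (d + 1) (by omega)]
      rw [firstZero, hstep]
      rw [if_neg (by omega)]
      cases firstZero (d + 1) rest <;> simp
    · by_cases hcl : c = ')'
      · have hstep : pvStep d c = d - 1 := by simp [pvStep, hcl]
        by_cases hz : d - 1 = 0
        · rw [stripParensLoopA, if_neg hop, if_pos hcl, if_pos hz]
          rw [firstZero, hstep, if_pos hz]
        · rw [stripParensLoopA, if_neg hop, if_pos hcl, if_neg hz, ih (d - 1) (by omega)]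
          rw [firstZero, hstep, if_neg hz]
          cases firstZero (d - 1) rest <;> simp
      · have hstep : pvStep d c = d := by simp [pvStep, hop, hcl]
        rw [stripParensLoopA, if_neg hop, if_neg hcl, ih d hd]
        rw [firstZero, hstep, if_neg (by omega)]
        cases firstZero d rest <;> simp

lemma firstZero_mono : ∀ (l : List Char) (d e : Int), 1 ≤ d → d ≤ e →
    firstZero d l = none → firstZero e l = none := by
  intro l
  induction l with
  | nil => intro d e _ _ _; rfl
  | cons c rest ih =>
    intro d e hd hde h
    rw [firstZero] at h ⊢
    have hdd : pvStep d c ≠ 0 := by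
      intro h0; rw [if_pos h0] at h; simp at h
    rw [if_neg hdd] at h
    have h1 : 1 ≤ pvStep d c := by
      unfold pvStep at hdd ⊢; split_ifs at hdd ⊢ <;> omega
    have h2 : pvStep d c ≤ pvStep e c := by
      unfold pvStep; split_ifs <;> omega
    rw [if_neg (by omega)]
    have hrest : firstZero (pvStep d c) rest = none := by
      cases hfz : firstZero (pvStep d c) rest
      · rfl
      · rw [hfz] at h; simp at h
    rw [ih (pvStep d c) (pvStep e c) h1 h2 hrest]; rfl

lemma firstZero_split : ∀ (l : List Char) (a d : Int) (k : Nat), 1 ≤ a → 1 ≤ d →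
    firstZero a l = some k →
    firstZero (d + a) l = (firstZero d (l.drop (k + 1))).map (fun k' => k + 1 + k') := by
  intro l
  induction l with
  | nil => intro a d k _ _ h; simp [firstZero] at h
  | cons c rest ih =>
    intro a d k ha hd h
    rw [firstZero] at h
    have hstep : pvStep (d + a) c = d + pvStep a c := by
      unfold pvStep; split_ifs <;> ring
    by_cases h0 : pvStep a c = 0
    · rw [if_pos h0] at h
      have hk : k = 0 := by injection h with h'; omega
      subst hk
      have hstep0 : pvStep (d + a) c = d := by rw [hstep, h0, add_zero]
      rw [firstZero, hstep0, if_neg (by omega)]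
      simp only [List.drop_succ_cons, List.drop_zero]
      cases firstZero d rest with
      | none => simp
      | some v => simp; omega
    · rw [if_neg h0] at h
      have h1 : 1 ≤ pvStep a c := by
        unfold pvStep at h0 ⊢; split_ifs at h0 ⊢ <;> omega
      obtain ⟨k0, hk0, hkk⟩ : ∃ k0, firstZero (pvStep a c) rest = some k0 ∧ k = k0 + 1 := by
        cases hfz : firstZero (pvStep a c) rest
        · rw [hfz] at h; simp at h
        · rw [hfz] at h; injection h with h'; exact ⟨_, rfl, h'.symm⟩
      subst hkk
      rw [firstZero, hstep, if_neg (by omega)]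
      rw [ih (pvStep a c) d k0 h1 hd hk0]
      simp only [List.drop_succ_cons]
      cases firstZero d (rest.drop (k0 + 1)) with
      | none => simp
      | some v => simp; omega

lemma matchAux_eq_firstZero : ∀ (n : Nat) (l : List Char), l.length ≤ n →
    matchAux l = firstZero 1 l := by
  intro n
  induction n with
  | zero =>
    intro l hl
    have : l = [] := List.eq_nil_of_length_eq_zero (by omega)
    subst this; simp [matchAux, firstZero]
  | succ n ih =>
    intro l hl
    cases l with
    | nil => simp [matchAux, firstZero]
    | cons c rest =>
      simp only [List.length_cons] at hl
      by_cases hcl : c = ')'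
      · rw [matchAux, if_pos hcl, firstZero]
        have : pvStep 1 c = 0 := by simp [pvStep, hcl]
        rw [if_pos this]
      · by_cases hop : c = '('
        · have hstep : pvStep 1 c = 2 := by simp [pvStep, hop]
          rw [matchAux, if_neg hcl, if_pos hop, firstZero, hstep, if_neg (by omega)]
          rw [ih rest (by omega)]
          cases hfz : firstZero 1 rest with
          | none =>
            rw [firstZero_mono rest 1 2 (by omega) (by omega) hfz]
            rfl
          | some k =>
            have hdrop : matchAux (rest.drop (k + 1)) = firstZero 1 (rest.drop (k + 1)) := by
              apply ih
              rw [List.length_drop]; omega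
            have h2 : firstZero 2 rest
                = (firstZero 1 (rest.drop (k + 1))).map (fun k' => k + 1 + k') := by
              have := firstZero_split rest 1 1 k (by omega) (by omega) hfz
              simpa using this
            rw [h2]
            cases hM : firstZero 1 (rest.drop (k + 1)) with
            | none => simp [hdrop, hM]
            | some v => simp [hdrop, hM]; omega
        · have hstep : pvStep 1 c = 1 := by simp [pvStep, hop, hcl]
          rw [matchAux, if_neg hcl, if_neg hop, firstZero, hstep, if_neg (by omega)]
          rw [ih rest (by omega)]

lemma firstZero_some_lt : ∀ (l : List Char) (d : Int) (k : Nat),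
    firstZero d l = some k → k < l.length := by
  intro l
  induction l with
  | nil => intro d k h; simp [firstZero] at h
  | cons c rest ih =>
    intro d k h
    rw [firstZero] at h
    by_cases h0 : pvStep d c = 0
    · rw [if_pos h0] at h; injection h with h'; simp [← h']
    · rw [if_neg h0] at h
      cases hfz : firstZero (pvStep d c) rest with
      | none => rw [hfz] at h; simp at h
      | some k0 =>
        rw [hfz] at h; injection h with h'
        have := ih (pvStep d c) k0 hfz
        simp [← h']; omega

lemma firstZero_append_some : ∀ (l : List Char) (d : Int) (k : Nat) (c : Char),
    firstZero d l = some k → firstZero d (l ++ [c]) = some k := by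
  intro l
  induction l with
  | nil => intro d k c h; simp [firstZero] at h
  | cons a rest ih =>
    intro d k c h
    rw [firstZero] at h
    rw [List.cons_append, firstZero]
    by_cases h0 : pvStep d a = 0
    · rw [if_pos h0] at h ⊢; exact h
    · rw [if_neg h0] at h ⊢
      cases hfz : firstZero (pvStep d a) rest with
      | none => rw [hfz] at h; simp at h
      | some k0 =>
        rw [hfz] at h
        rw [ih (pvStep d a) k0 c hfz]
        exact h

lemma firstZero_append_none : ∀ (l : List Char) (d : Int) (c : Char),
    firstZero d l = none →
    firstZero d (l ++ [c]) = none ∨ firstZero d (l ++ [c]) = some l.length := by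
  intro l
  induction l with
  | nil =>
    intro d c _
    simp only [List.nil_append, List.length_nil, firstZero]
    by_cases h0 : pvStep d c = 0
    · right; rw [if_pos h0]
    · left; rw [if_neg h0]; rfl
  | cons a rest ih =>
    intro d c h
    rw [firstZero] at h
    have h0 : pvStep d a ≠ 0 := by
      intro h0; rw [if_pos h0] at h; simp at h
    rw [if_neg h0] at h
    have hrest : firstZero (pvStep d a) rest = none := by
      cases hfz : firstZero (pvStep d a) rest
      · rfl
      · rw [hfz] at h; simp at h
    rw [List.cons_append, firstZero, if_neg h0]
    rcases ih (pvStep d a) c hrest with h1 | h1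
    · left; rw [h1]; rfl
    · right; rw [h1]; simp

-- word[1:-1] as drop/dropLast, for a word of length ≥ 2
lemma slice_one_neg_one (xs : List Char) (h : 2 ≤ xs.length) :
    PySem.List.slice xs (some 1) (some (-1)) = xs.tail.dropLast := by
  have hne : xs ≠ [] := by intro h0; simp [h0] at h
  simp [PySem.List.slice, PySem.List.clampIdx, hne]
  have h1 : min 1 xs.length = 1 := by omega
  have h2 : ((xs.length : Int) + -1).toNat = xs.length - 1 := by omega
  rw [h1, h2, ← List.drop_one, List.dropLast_eq_take, List.length_drop]

-- ===== VERDICT =====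
theorem strip_parens_spec : Claim_equal_strip_parens := by
  intro word _ _
  unfold Spec_strip_parens strip_parens strip_parens_alt
  by_cases hg : PySem.List.pyGet? word.toList 0 ≠ some '(' ∨ PySem.List.pyGet? word.toList (-1) ≠ some ')'
  · simp only [hg, if_pos]
  · simp only [hg, if_neg, not_false_iff]
    simp only [not_or, ne_eq, not_not] at hg
    obtain ⟨hg0, hg1⟩ := hg
    have hW : String.ofList word.toList = word := String.ofList_toList
    cases hcase : word.toList with
    | nil =>
      rw [hcase] at hg0
      simp [PySem.List.pyGet?, PySem.List.pyIdx?] at hg0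
    | cons a t =>
      rcases List.eq_nil_or_concat' t with rfl | ⟨mid, r, rfl⟩
      · rw [hcase] at hg0 hg1
        simp [PySem.List.pyGet?, PySem.List.pyIdx?] at hg0 hg1
        rw [hg0] at hg1
        exact absurd hg1 (by decide)
      · rw [hcase] at hg0 hg1 hW
        have ha : a = '(' := by
          simp [PySem.List.pyGet?, PySem.List.pyIdx?,
            show (0:Int) ≤ (mid.length:Int) + 1 from by positivity] at hg0
          exact hg0
        have hr : r = ')' := by
          simp only [PySem.List.pyGet?, PySem.List.pyIdx?] at hg1
          norm_num at hg1
          exact hg1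
        subst ha; subst hr
        rw [slice_one_neg_one _ (by simp)]
        simp only [List.tail_cons, List.dropLast_concat, List.drop_succ_cons, List.drop_zero]
        rw [matchAux_eq_firstZero (mid ++ [')']).length _ le_rfl]
        rw [loopA_eq_firstZero _ _ _ 1 (by omega)]
        cases hfz : firstZero 1 mid with
        | some k =>
          have hk := firstZero_some_lt _ _ _ hfz
          rw [firstZero_append_some mid 1 k ')' hfz]
          have hne2 : k ≠ mid.length := by omega
          simp [hne2]
          exact hW
        | none =>
          rcases firstZero_append_none mid 1 ')' hfz with h1 | h1
          · rw [h1]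
          · rw [h1]
            simp
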